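-- pv_equiv track=rewrite | github.com/ltfafei/py_Leetcode_study | Strings/23.checkWordAcronym.py | isAcronym
-- ===== SOURCE A (Python) =====
-- def WordAcronym(word):
--     if len(word) < 3:
--         return word
--     #返回每个单词缩写结果
--     return word[0] + str(len(word) - 2) + word[-1]
--
-- def isAcronym(l):
--     tmp = []
--     for i in l:
--         s = WordAcronym(i)
--         if s in tmp:
--             return True
--         tmp.append(s)   #将转换后的结果放入tmp[]临时列表
--     return False
-- ===== SOURCE B (Python) =====
-- def WordAcronym(word):
--     if len(word) < 3:
--         return word
--     return word[0] + str(len(word) - 2) + word[-1]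
--
--
-- def isAcronym(l):
--     # build all acronyms, then a single aggregate duplicate test
--     acr = [WordAcronym(i) for i in l]
--     return len(acr) != len(set(acr))
-- ===== Notes on version B (the rewrite author's own statement) =====
-- stated objective: simpler
-- what changed: Replaced the incremental membership-test-and-early-return loop over a growing tmp list with a build-all map of acronyms followed by one aggregate comparison len(acr) != len(set(acr)).
import Mathlib
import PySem

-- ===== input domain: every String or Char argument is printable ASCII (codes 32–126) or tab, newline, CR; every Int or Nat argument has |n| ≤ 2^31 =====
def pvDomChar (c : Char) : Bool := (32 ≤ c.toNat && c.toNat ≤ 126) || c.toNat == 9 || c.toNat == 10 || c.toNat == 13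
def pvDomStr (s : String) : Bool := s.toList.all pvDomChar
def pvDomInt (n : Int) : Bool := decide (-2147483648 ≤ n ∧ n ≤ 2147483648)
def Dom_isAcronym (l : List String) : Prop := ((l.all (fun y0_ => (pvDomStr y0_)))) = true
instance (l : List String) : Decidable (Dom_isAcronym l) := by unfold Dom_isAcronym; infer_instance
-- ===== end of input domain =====

-- B replaces A's grow-a-list-and-test-membership loop with a map plus one aggregate
-- duplicate test (len(acr) != len(set(acr))); objective: simpler.

-- ===== PORT A =====
-- shared helper, identical in Source A and Source B
-- word[0] / word[-1] via Str.pyGet? (Option Char, toList = [] or [c]); exact since the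
-- branch guarantees len(word) ≥ 3, so both indices are in range.
def WordAcronym (word : String) : String :=
  if PySem.Str.len word < 3 then word
  else
    String.mk ((PySem.Str.pyGet? word 0).toList
      ++ (PySem.Int.toStr (PySem.Str.len word - 2)).toList
      ++ (PySem.Str.pyGet? word (-1)).toList)

def isAcronymLoop : List String → List String → Bool
  | [], _ => false
  | i :: rest, tmp =>
    let s := WordAcronym i
    if tmp.contains s then true
    else isAcronymLoop rest (tmp ++ [s])

def isAcronym (l : List String) : Bool := isAcronymLoop l []

-- ===== PORT B =====
def isAcronym_alt (l : List String) : Bool :=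
  let acr := l.map WordAcronym
  acr.length != (PySem.Set.ofList acr).length

-- ===== PRECONDITION & SPEC =====
def Spec_isAcronym (l : List String) (out : Bool) : Prop := out = isAcronym_alt l
instance (l : List String) (out : Bool) : Decidable (Spec_isAcronym l out) := by unfold Spec_isAcronym; infer_instance

-- ===== CLAIM (what is proved, stated in full; the proofs are below) =====
def Claim_equal_isAcronym : Prop := ∀ (l : List String), Dom_isAcronym l → Spec_isAcronym l (isAcronym l)

-- ===== LEMMAS AND PROOFS =====

theorem ofList_sublist {α : Type} [BEq α] (xs : List α) :
    (PySem.Set.ofList xs).Sublist xs := by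
  induction xs using List.reverseRecOn with
  | nil => simp [PySem.Set.ofList]
  | append_singleton ys y ih =>
    have : PySem.Set.ofList (ys ++ [y]) = PySem.Set.add (PySem.Set.ofList ys) y := by
      simp [PySem.Set.ofList, List.foldl_append]
    rw [this]
    unfold PySem.Set.add
    split
    · exact ih.trans (List.sublist_append_left ys [y])
    · exact ih.append (List.Sublist.refl [y])

theorem length_ofList_eq_iff (xs : List String) :
    (PySem.Set.ofList xs).length = xs.length ↔ xs.Nodup := by
  constructor
  · intro h
    have := (ofList_sublist xs).eq_of_length h
    rw [← this]
    exact PySem.Set.nodup_ofList xs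
  · intro h
    rw [PySem.Set.ofList_eq_self_of_nodup xs h]

theorem loop_eq (l : List String) : ∀ (tmp : List String), tmp.Nodup →
    isAcronymLoop l tmp = decide ¬(tmp ++ l.map WordAcronym).Nodup := by
  induction l with
  | nil =>
    intro tmp h
    simp [isAcronymLoop, h]
  | cons i rest ih =>
    intro tmp h
    rw [isAcronymLoop]
    by_cases hm : WordAcronym i ∈ tmp
    · have hc : tmp.contains (WordAcronym i) = true := by simpa using hm
      simp only [hc, if_true]
      symm
      simp only [decide_eq_true_eq, List.map_cons]
      intro hnd
      rcases List.nodup_append.mp hnd with ⟨_, _, hdisj⟩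
      exact hdisj _ hm _ (by simp) rfl
    · have hc : tmp.contains (WordAcronym i) = false := by simpa using hm
      simp only [hc, Bool.false_eq_true, if_false]
      have hnd : (tmp ++ [WordAcronym i]).Nodup := by
        rw [List.nodup_append]
        refine ⟨h, List.nodup_singleton _, ?_⟩
        intro a ha b hb
        simp only [List.mem_singleton] at hb
        subst hb
        exact fun he => hm (he ▸ ha)
      rw [ih _ hnd]
      congr 1
      simp

-- ===== VERDICT (by name: the statement is the Claim_ definition above) =====
theorem isAcronym_spec : Claim_equal_isAcronym := by
  intro l _
  unfold Spec_isAcronym isAcronym isAcronym_alt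
  rw [loop_eq l [] List.nodup_nil, List.nil_append]
  have hiff := length_ofList_eq_iff (l.map WordAcronym)
  by_cases h : (l.map WordAcronym).Nodup
  · simp [h, hiff.mpr h]
  · have hne : (PySem.Set.ofList (l.map WordAcronym)).length ≠ (l.map WordAcronym).length :=
      fun he => h (hiff.mp he)
    simp only [h, not_false_iff, decide_true]
    symm
    simp only [bne_iff_ne, ne_eq]
    exact fun he => hne (Eq.symm he)
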